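-- pv_equiv track=rewrite | github.com/HussainAther/DFlow-Peptide-Membrane | dflow_reversible.py | _weak_edge_scores
-- ===== SOURCE A (Python) =====
-- def _weak_edge_scores(nodes, adj):
--     """Score edges by shared neighbors; fewer shared ⇒ weaker."""
--     scores = {}
--     for i in nodes:
--         if i not in adj: continue
--         for j in adj[i]:
--             if i < j:
--                 scores[(i,j)] = len(adj[i] & adj.get(j, set()))
--     return scores
-- ===== SOURCE B (Python) =====
-- def _weak_edge_scores(nodes, adj):
--     """Score edges by shared neighbors; fewer shared => weaker."""
--     # Phase 1: register every edge key with score 0 (same key order as A).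
--     scores = {}
--     for i in nodes:
--         if i not in adj: continue
--         for j in adj[i]:
--             if i < j:
--                 scores[(i, j)] = 0
--     # Phase 2: reverse index  w -> list of x with w in adj[x].
--     rev = {}
--     for x, nbrs in adj.items():
--         for w in nbrs:
--             rev.setdefault(w, []).append(x)
--     # Phase 3: each shared neighbor w of an edge (a,b) contributes one count.
--     for w, xs in rev.items():
--         for a in xs:
--             for b in xs:
--                 if a < b and (a, b) in scores:
--                     scores[(a, b)] += 1
--     return scores
-- ===== Notes on version B (the rewrite author's own statement) =====
-- stated objective: alternative
-- what changed: Instead of computing len(adj[i] & adj.get(j, set())) per edge, B initializes all edge keys to 0, builds a reverse index w -> [x : w in adj[x]] over the whole adjacency, and then lets each neighbor w contribute one count to every registered edge (a,b) with a,b in its index list.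
import Mathlib
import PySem

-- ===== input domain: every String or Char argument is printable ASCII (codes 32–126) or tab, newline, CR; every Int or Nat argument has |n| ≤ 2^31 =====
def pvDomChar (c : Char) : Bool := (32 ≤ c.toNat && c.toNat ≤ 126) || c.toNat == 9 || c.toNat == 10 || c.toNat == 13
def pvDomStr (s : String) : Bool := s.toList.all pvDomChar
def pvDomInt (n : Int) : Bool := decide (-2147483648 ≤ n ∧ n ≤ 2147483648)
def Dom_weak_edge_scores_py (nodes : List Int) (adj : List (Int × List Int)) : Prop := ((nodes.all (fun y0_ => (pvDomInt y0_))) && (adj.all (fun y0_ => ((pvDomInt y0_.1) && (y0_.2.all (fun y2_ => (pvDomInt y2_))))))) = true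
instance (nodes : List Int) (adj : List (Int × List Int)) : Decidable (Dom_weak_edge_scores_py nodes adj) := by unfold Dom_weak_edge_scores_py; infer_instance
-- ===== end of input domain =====

-- B replaces the per-edge set intersection by a reverse index w ↦ {x | w ∈ adj[x]} from which each
-- shared neighbor contributes one count to its edge (objective: alternative algorithm, same cost class).

-- ===== PORT A =====
def weak_edge_scores_py (nodes : List Int) (adj : List (Int × List Int)) : List (Int × Int × Int) :=
  -- scores = {}; for i in nodes: if i not in adj: continue; for j in adj[i]:
  --   if i < j: scores[(i,j)] = len(adj[i] & adj.get(j, set()))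
  (nodes.foldl
    (fun scores i =>
      match (PySem.Dict.mk adj).get? i with
      | none => scores
      | some ai =>
        ai.foldl
          (fun scores j =>
            if i < j then
              scores.insert (i, j)
                ((PySem.Set.inter ai ((PySem.Dict.mk adj).getD j [])).length : Int)
            else scores)
          scores)
    (PySem.Dict.mk ([] : List ((Int × Int) × Int)))).items.map (fun p => (p.1.1, p.1.2, p.2))

-- ===== PORT B =====
def weak_edge_scores_py_alt (nodes : List Int) (adj : List (Int × List Int)) : List (Int × Int × Int) :=
  -- Phase 1: scores[(i,j)] = 0 for every edge key, in A's key order.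
  let scores0 : PySem.Dict (Int × Int) Int :=
    nodes.foldl
      (fun scores i =>
        match (PySem.Dict.mk adj).get? i with
        | none => scores
        | some ai =>
          ai.foldl
            (fun scores j => if i < j then scores.insert (i, j) 0 else scores)
            scores)
      (PySem.Dict.mk [])
  -- Phase 2: rev = {}; for x, nbrs in adj.items(): for w in nbrs: rev.setdefault(w, []).append(x)
  let rev : PySem.Dict Int (List Int) :=
    adj.foldl
      (fun rev p => p.2.foldl (fun rev w => rev.modify w [] (fun l => l ++ [p.1])) rev)
      (PySem.Dict.mk [])
  -- Phase 3: for w, xs in rev.items(): for a in xs: for b in xs: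
  --   if a < b and (a,b) in scores: scores[(a,b)] += 1
  let scores : PySem.Dict (Int × Int) Int :=
    rev.items.foldl
      (fun scores q =>
        q.2.foldl
          (fun scores a =>
            q.2.foldl
              (fun scores b =>
                if a < b ∧ scores.contains (a, b) = true then
                  scores.insert (a, b) (scores.getD (a, b) 0 + 1)
                else scores)
              scores)
          scores)
      scores0
  scores.items.map (fun p => (p.1.1, p.1.2, p.2))

-- ===== PRECONDITION & SPEC =====
-- Pre_ encodes the Python type dict[int, set[int]] under the list convention: the dict's keys are
-- pairwise distinct and each value, being a set, is a list of distinct elements.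
def Pre_weak_edge_scores_py (nodes : List Int) (adj : List (Int × List Int)) : Prop :=
  (adj.map Prod.fst).Nodup ∧ ∀ p ∈ adj, p.2.Nodup
instance (nodes : List Int) (adj : List (Int × List Int)) : Decidable (Pre_weak_edge_scores_py nodes adj) := by unfold Pre_weak_edge_scores_py; infer_instance

def pvWitness_weak_edge_scores_py : List Int × (List (Int × List Int)) :=
  ([1, 2, 3], [(1, [2, 3]), (2, [3, 1]), (3, [1, 2])])

def Spec_weak_edge_scores_py (nodes : List Int) (adj : List (Int × List Int)) (out : List (Int × Int × Int)) : Prop := out = weak_edge_scores_py_alt nodes adj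
instance (nodes : List Int) (adj : List (Int × List Int)) (out : List (Int × Int × Int)) : Decidable (Spec_weak_edge_scores_py nodes adj out) := by unfold Spec_weak_edge_scores_py; infer_instance

-- ===== CLAIM (what is proved, stated in full; the proofs are below) =====
def Claim_equal_weak_edge_scores_py : Prop := ∀ (nodes : List Int) (adj : List (Int × List Int)), Dom_weak_edge_scores_py nodes adj → Pre_weak_edge_scores_py nodes adj → Spec_weak_edge_scores_py nodes adj (weak_edge_scores_py nodes adj)

-- ===== LEMMAS AND PROOFS =====

-- ---- helper objects used only by the proofs ----

-- adj.get(x, set()) as a list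
def pvAG (adj : List (Int × List Int)) (x : Int) : List Int := (PySem.Dict.mk adj).getD x []

-- the score A stores at edge key k
def pvVal (adj : List (Int × List Int)) (k : Int × Int) : Int :=
  ((PySem.Set.inter (pvAG adj k.1) (pvAG adj k.2)).length : Int)

-- the sequence of edge keys generated by A's (and B's phase-1) double loop
def pvEdges (nodes : List Int) (adj : List (Int × List Int)) : List (Int × Int) :=
  nodes.flatMap (fun i =>
    match (PySem.Dict.mk adj).get? i with
    | none => []
    | some ai => (ai.filter (fun j => decide (i < j))).map (fun j => (i, j)))

-- the (neighbor, source) pairs B's phase 2 feeds into the reverse index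
def pvPairs (adj : List (Int × List Int)) : List (Int × Int) :=
  adj.flatMap (fun p => p.2.map (fun w => (w, p.1)))

-- B's reverse index
def pvRev (adj : List (Int × List Int)) : PySem.Dict Int (List Int) :=
  adj.foldl
    (fun rev p => p.2.foldl (fun rev w => rev.modify w [] (fun l => l ++ [p.1])) rev)
    (PySem.Dict.mk [])

-- ---- generic facts about the insert loops ----

theorem pv_foldl_insert_getD (v : (Int × Int) → Int) (L : List (Int × Int))
    (d : PySem.Dict (Int × Int) Int) (k : Int × Int) :
    (L.foldl (fun d x => d.insert x (v x)) d).getD k 0 =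
      if k ∈ L then v k else d.getD k 0 := by
  induction L generalizing d with
  | nil => simp
  | cons a L ih =>
      simp only [List.foldl_cons, ih, List.mem_cons]
      by_cases h1 : k ∈ L
      · simp [h1]
      · by_cases h2 : k = a
        · subst h2; simp [h1, PySem.Dict.getD_insert_self]
        · simp [h1, h2, PySem.Dict.getD_insert_of_ne _ _ _ h2]

theorem pv_foldA_eq (adj : List (Int × List Int)) (nodes : List Int)
    (d : PySem.Dict (Int × Int) Int) :
    nodes.foldl
      (fun scores i =>
        match (PySem.Dict.mk adj).get? i with
        | none => scores
        | some ai =>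
          ai.foldl
            (fun scores j =>
              if i < j then
                scores.insert (i, j)
                  ((PySem.Set.inter ai ((PySem.Dict.mk adj).getD j [])).length : Int)
              else scores)
            scores) d
    = (pvEdges nodes adj).foldl (fun sc k => sc.insert k (pvVal adj k)) d := by
  induction nodes generalizing d with
  | nil => simp [pvEdges]
  | cons i ns ih =>
      rw [List.foldl_cons, ih]
      simp only [pvEdges, List.flatMap_cons, List.foldl_append]
      cases h : (PySem.Dict.mk adj).get? i with
      | none => simp
      | some ai =>
          have hai : (PySem.Dict.mk adj).getD i [] = ai :=
            PySem.Dict.getD_of_get?_eq_some _ _ h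
          simp only [List.foldl_map, List.foldl_filter, decide_eq_true_eq, pvVal, pvAG]
          simp only [← hai]

theorem pv_foldB0_eq (adj : List (Int × List Int)) (nodes : List Int)
    (d : PySem.Dict (Int × Int) Int) :
    nodes.foldl
      (fun scores i =>
        match (PySem.Dict.mk adj).get? i with
        | none => scores
        | some ai =>
          ai.foldl
            (fun scores j => if i < j then scores.insert (i, j) 0 else scores)
            scores) d
    = (pvEdges nodes adj).foldl (fun sc k => sc.insert k 0) d := by
  induction nodes generalizing d with
  | nil => simp [pvEdges]
  | cons i ns ih =>
      rw [List.foldl_cons, ih]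
      simp only [pvEdges, List.flatMap_cons, List.foldl_append]
      cases h : (PySem.Dict.mk adj).get? i with
      | none => simp
      | some ai =>
          simp only [List.foldl_map, List.foldl_filter, decide_eq_true_eq]

theorem pv_keys_insert_fold (v : (Int × Int) → Int) (L : List (Int × Int)) :
    (L.foldl (fun sc k => sc.insert k (v k)) (PySem.Dict.mk [])).keys =
      PySem.Set.ofList L := by
  rw [PySem.Dict.keys_foldl_insert L (fun _ k => v k) (PySem.Dict.mk [])]
  rfl

theorem pv_edges_lt (nodes : List Int) (adj : List (Int × List Int)) (k : Int × Int)
    (h : k ∈ pvEdges nodes adj) : k.1 < k.2 := by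
  simp only [pvEdges, List.mem_flatMap] at h
  obtain ⟨i, _, hk⟩ := h
  cases hg : (PySem.Dict.mk adj).get? i with
  | none => rw [hg] at hk; simp at hk
  | some ai =>
      rw [hg] at hk
      simp only [List.mem_map, List.mem_filter, decide_eq_true_eq] at hk
      obtain ⟨j, ⟨_, hij⟩, rfl⟩ := hk
      exact hij

-- ---- facts about B's phase 3 (the counting loops) ----

theorem pv_keys3 (a' : Int) (l : List Int) (sc : PySem.Dict (Int × Int) Int) :
    (l.foldl (fun sc b' => if a' < b' ∧ sc.contains (a', b') = true then
        sc.insert (a', b') (sc.getD (a', b') 0 + 1) else sc) sc).keys = sc.keys := by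
  induction l generalizing sc with
  | nil => rfl
  | cons b' l ih =>
      rw [List.foldl_cons, ih]
      split_ifs with h
      · exact PySem.Dict.keys_insert_of_contains _ _ h.2
      · rfl

theorem pv_keys2 (xs l : List Int) (sc : PySem.Dict (Int × Int) Int) :
    (l.foldl (fun sc a' => xs.foldl (fun sc b' => if a' < b' ∧ sc.contains (a', b') = true then
        sc.insert (a', b') (sc.getD (a', b') 0 + 1) else sc) sc) sc).keys = sc.keys := by
  induction l generalizing sc with
  | nil => rfl
  | cons a' l ih => rw [List.foldl_cons, ih, pv_keys3]

theorem pv_keys1 (items : List (Int × List Int)) (sc : PySem.Dict (Int × Int) Int) :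
    (items.foldl (fun sc q =>
        q.2.foldl (fun sc a' => q.2.foldl (fun sc b' =>
          if a' < b' ∧ sc.contains (a', b') = true then
            sc.insert (a', b') (sc.getD (a', b') 0 + 1) else sc) sc) sc) sc).keys
      = sc.keys := by
  induction items generalizing sc with
  | nil => rfl
  | cons q items ih => rw [List.foldl_cons, ih, pv_keys2]

theorem pv_getD3 (a b a' : Int) (hab : a < b) (K : List (Int × Int)) (hK : (a, b) ∈ K)
    (l : List Int) (sc : PySem.Dict (Int × Int) Int) (hk : sc.keys = K) :
    (l.foldl (fun sc b' => if a' < b' ∧ sc.contains (a', b') = true then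
        sc.insert (a', b') (sc.getD (a', b') 0 + 1) else sc) sc).getD (a, b) 0 =
      sc.getD (a, b) 0 + (if a' = a then (l.count b : Int) else 0) := by
  induction l generalizing sc with
  | nil => simp
  | cons b' l ih =>
      rw [List.foldl_cons]
      set sc' := if a' < b' ∧ sc.contains (a', b') = true then
        sc.insert (a', b') (sc.getD (a', b') 0 + 1) else sc with hsc'
      have hkeys' : sc'.keys = K := by
        rw [hsc']
        split_ifs with h
        · rw [PySem.Dict.keys_insert_of_contains _ _ h.2]; exact hk
        · exact hk
      rw [ih sc' hkeys']
      have hmain : sc'.getD (a, b) 0 =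
          sc.getD (a, b) 0 + (if a' = a ∧ b' = b then 1 else 0) := by
        by_cases hkey : a' = a ∧ b' = b
        · obtain ⟨rfl, rfl⟩ := hkey
          have hc : sc.contains (a', b') = true := by
            rw [PySem.Dict.contains_eq_decide_mem_keys, hk]
            exact decide_eq_true hK
          rw [hsc', if_pos ⟨hab, hc⟩, PySem.Dict.getD_insert_self, if_pos ⟨rfl, rfl⟩]
        · have hne : ((a, b) : Int × Int) ≠ (a', b') := by
            intro h'
            exact hkey ⟨(congrArg Prod.fst h').symm, (congrArg Prod.snd h').symm⟩
          rw [if_neg hkey, hsc']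
          split_ifs with h
          · rw [PySem.Dict.getD_insert_of_ne _ _ _ hne]; ring
          · ring
      rw [hmain]
      rcases eq_or_ne a' a with rfl | ha
      · rcases eq_or_ne b' b with rfl | hb
        · rw [if_pos ⟨rfl, rfl⟩, if_pos rfl, if_pos rfl, List.count_cons_self]
          push_cast
          ring
        · rw [if_neg (fun hh => hb hh.2), if_pos rfl, if_pos rfl, List.count_cons,
            beq_eq_false_iff_ne.2 hb]
          simp
      · rw [if_neg (fun hh => ha hh.1), if_neg ha, if_neg ha]
        ring

theorem pv_getD2 (a b : Int) (hab : a < b) (K : List (Int × Int)) (hK : (a, b) ∈ K)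
    (xs : List Int) (l : List Int) (sc : PySem.Dict (Int × Int) Int) (hk : sc.keys = K) :
    (l.foldl (fun sc a' => xs.foldl (fun sc b' => if a' < b' ∧ sc.contains (a', b') = true then
        sc.insert (a', b') (sc.getD (a', b') 0 + 1) else sc) sc) sc).getD (a, b) 0 =
      sc.getD (a, b) 0 + (l.count a : Int) * (xs.count b : Int) := by
  induction l generalizing sc with
  | nil => simp
  | cons a' l ih =>
      rw [List.foldl_cons]
      have hkeys' : (xs.foldl (fun sc b' => if a' < b' ∧ sc.contains (a', b') = true then
          sc.insert (a', b') (sc.getD (a', b') 0 + 1) else sc) sc).keys = K := by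
        rw [pv_keys3]; exact hk
      rw [ih _ hkeys', pv_getD3 a b a' hab K hK xs sc hk]
      rcases eq_or_ne a' a with rfl | ha
      · rw [if_pos rfl, List.count_cons_self]
        push_cast
        ring
      · rw [if_neg ha, List.count_cons, beq_eq_false_iff_ne.2 ha]
        simp

theorem pv_getD1 (a b : Int) (hab : a < b) (K : List (Int × Int)) (hK : (a, b) ∈ K)
    (items : List (Int × List Int)) (sc : PySem.Dict (Int × Int) Int) (hk : sc.keys = K) :
    (items.foldl (fun sc q =>
        q.2.foldl (fun sc a' => q.2.foldl (fun sc b' =>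
          if a' < b' ∧ sc.contains (a', b') = true then
            sc.insert (a', b') (sc.getD (a', b') 0 + 1) else sc) sc) sc) sc).getD (a, b) 0
      = sc.getD (a, b) 0
        + (items.map (fun q => ((q.2.count a : Int)) * ((q.2.count b : Int)))).sum := by
  induction items generalizing sc with
  | nil => simp
  | cons q items ih =>
      rw [List.foldl_cons]
      have hkeys' : (q.2.foldl (fun sc a' => q.2.foldl (fun sc b' =>
          if a' < b' ∧ sc.contains (a', b') = true then
            sc.insert (a', b') (sc.getD (a', b') 0 + 1) else sc) sc) sc).keys = K := by
        rw [pv_keys2]; exact hk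
      rw [ih _ hkeys', pv_getD2 a b hab K hK q.2 q.2 sc hk]
      rw [List.map_cons, List.sum_cons]
      ring

-- ---- facts about B's phase 2 (the reverse index) ----

theorem pv_rev_eq (adj : List (Int × List Int)) (r : PySem.Dict Int (List Int)) :
    adj.foldl
      (fun rev p => p.2.foldl (fun rev w => rev.modify w [] (fun l => l ++ [p.1])) rev) r
    = (pvPairs adj).foldl (fun rev q => rev.modify q.1 [] (fun l => l ++ [q.2])) r := by
  rw [pvPairs, List.foldl_flatMap]
  simp only [List.foldl_map]

theorem pv_rev_getD (adj : List (Int × List Int)) (w : Int) :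
    (pvRev adj).getD w [] = ((pvPairs adj).filter (fun q => q.1 == w)).map (fun q => q.2) := by
  rw [pvRev, pv_rev_eq, PySem.Dict.getD_foldl_modify_append]
  rfl

theorem pv_rev_keys (adj : List (Int × List Int)) :
    (pvRev adj).keys = PySem.Set.ofList ((pvPairs adj).map Prod.fst) := by
  rw [pvRev, pv_rev_eq,
    PySem.Dict.keys_foldl_modify_key (pvPairs adj) Prod.fst [] (fun _ q => fun l => l ++ [q.2])]
  rfl

theorem pv_filter_beq_of_nodup (l : List Int) (hn : l.Nodup) (a : Int) :
    l.filter (fun y => y == a) = if a ∈ l then [a] else [] := by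
  induction l with
  | nil => rfl
  | cons x l ih =>
      rcases List.nodup_cons.1 hn with ⟨hx, hl⟩
      rw [List.filter_cons]
      by_cases hxa : x = a
      · subst hxa
        rw [if_pos (by simp), ih hl, if_neg hx, if_pos (List.mem_cons_self ..)]
      · rw [if_neg (by simp [hxa]), ih hl]
        by_cases hal : a ∈ l
        · rw [if_pos hal, if_pos (List.mem_cons_of_mem _ hal)]
        · rw [if_neg hal, if_neg (by simp [hal, Ne.symm hxa])]

theorem pv_chunk (x : Int) (nb : List Int) (hn : nb.Nodup) (w : Int) :
    ((nb.map (fun w' => (w', x))).filter (fun q => q.1 == w)).map (fun q => q.2)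
      = if w ∈ nb then [x] else [] := by
  rw [List.filter_map, List.map_map]
  rw [show ((fun q : Int × Int => q.2) ∘ fun w' => ((w', x) : Int × Int)) = fun _ => x from rfl]
  rw [show ((fun q : Int × Int => q.1 == w) ∘ fun w' => ((w', x) : Int × Int))
        = fun y => y == w from rfl]
  rw [pv_filter_beq_of_nodup nb hn w]
  split_ifs <;> rfl

theorem pv_pairs_filter (adj : List (Int × List Int)) (hv : ∀ p ∈ adj, p.2.Nodup) (w : Int) :
    ((pvPairs adj).filter (fun q => q.1 == w)).map (fun q => q.2)
      = (adj.filter (fun p => decide (w ∈ p.2))).map Prod.fst := by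
  induction adj with
  | nil => rfl
  | cons p rest ih =>
      have hp : p.2.Nodup := hv p (by simp)
      have hrest : ∀ q ∈ rest, q.2.Nodup := fun q hq => hv q (by simp [hq])
      simp only [pvPairs, List.flatMap_cons, List.filter_append, List.map_append]
      rw [show (rest.flatMap (fun p => p.2.map (fun w => (w, p.1)))) = pvPairs rest from rfl,
        ih hrest, pv_chunk p.1 p.2 hp w, List.filter_cons]
      by_cases hw : w ∈ p.2
      · simp [hw]
      · simp [hw]

theorem pv_AG_nodup (adj : List (Int × List Int)) (hv : ∀ p ∈ adj, p.2.Nodup) (x : Int) :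
    (pvAG adj x).Nodup := by
  unfold pvAG
  cases h : (PySem.Dict.mk adj).get? x with
  | none => rw [PySem.Dict.getD_of_get?_eq_none _ _ h]; exact List.nodup_nil
  | some v =>
      rw [PySem.Dict.getD_of_get?_eq_some _ _ h]
      exact hv (x, v) (PySem.Dict.mem_items_of_get?_eq_some _ h)

theorem pv_mem_AG (adj : List (Int × List Int)) (hA : (adj.map Prod.fst).Nodup) (a w : Int) :
    w ∈ pvAG adj a ↔ ∃ p ∈ adj, p.1 = a ∧ w ∈ p.2 := by
  unfold pvAG
  constructor
  · intro hw
    cases h : (PySem.Dict.mk adj).get? a with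
    | none => rw [PySem.Dict.getD_of_get?_eq_none _ _ h] at hw; simp at hw
    | some v =>
        rw [PySem.Dict.getD_of_get?_eq_some _ _ h] at hw
        exact ⟨(a, v), PySem.Dict.mem_items_of_get?_eq_some _ h, rfl, hw⟩
  · rintro ⟨p, hp, hpa, hw⟩
    have hkeys : (PySem.Dict.mk adj).keys.Nodup := by rw [PySem.Dict.keys_mk]; exact hA
    have hin : (a, p.2) ∈ (PySem.Dict.mk adj).items := by
      rw [show (PySem.Dict.mk adj).items = adj from rfl, ← hpa]
      simpa using hp
    have hg := PySem.Dict.get?_of_mem_items _ hin hkeys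
    rw [PySem.Dict.getD_of_get?_eq_some _ _ hg]
    exact hw

theorem pv_mem_rev_getD (adj : List (Int × List Int)) (hA : (adj.map Prod.fst).Nodup)
    (hv : ∀ p ∈ adj, p.2.Nodup) (w a : Int) :
    a ∈ (pvRev adj).getD w [] ↔ w ∈ pvAG adj a := by
  rw [pv_rev_getD, pv_pairs_filter adj hv w, pv_mem_AG adj hA a w]
  simp only [List.mem_map, List.mem_filter, decide_eq_true_eq]
  constructor
  · rintro ⟨p, ⟨hp, hw⟩, rfl⟩; exact ⟨p, hp, rfl, hw⟩
  · rintro ⟨p, hp, hpa, hw⟩; exact ⟨p, ⟨hp, hw⟩, hpa⟩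

theorem pv_rev_getD_nodup (adj : List (Int × List Int)) (hA : (adj.map Prod.fst).Nodup)
    (hv : ∀ p ∈ adj, p.2.Nodup) (w : Int) :
    ((pvRev adj).getD w []).Nodup := by
  rw [pv_rev_getD, pv_pairs_filter adj hv w]
  exact List.Nodup.sublist (List.Sublist.map Prod.fst List.filter_sublist) hA

theorem pv_mem_rev_keys (adj : List (Int × List Int)) (a w : Int) (h : w ∈ pvAG adj a) :
    w ∈ (pvRev adj).keys := by
  rw [pv_rev_keys, PySem.Set.mem_ofList, List.mem_map]
  unfold pvAG at h
  cases hg : (PySem.Dict.mk adj).get? a with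
  | none => rw [PySem.Dict.getD_of_get?_eq_none _ _ hg] at h; simp at h
  | some v =>
      rw [PySem.Dict.getD_of_get?_eq_some _ _ hg] at h
      have hin : (a, v) ∈ adj := PySem.Dict.mem_items_of_get?_eq_some _ hg
      refine ⟨(w, a), ?_, rfl⟩
      simp only [pvPairs, List.mem_flatMap]
      exact ⟨(a, v), hin, by simp only [List.mem_map]; exact ⟨w, h, rfl⟩⟩

-- ===== VERDICT (by name: the statement is the Claim_ definition above) =====
theorem weak_edge_scores_py_spec : Claim_equal_weak_edge_scores_py := by
  intro nodes adj _ hpre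
  obtain ⟨hA, hv⟩ := hpre
  unfold Spec_weak_edge_scores_py
  simp only [weak_edge_scores_py, weak_edge_scores_py_alt]
  rw [pv_foldA_eq, pv_foldB0_eq]
  rw [show (adj.foldl (fun rev p => p.2.foldl
        (fun rev w => rev.modify w [] (fun l => l ++ [p.1])) rev)
        (PySem.Dict.mk [])) = pvRev adj from rfl]
  congr 1
  have hndK : (PySem.Set.ofList (pvEdges nodes adj)).Nodup :=
    PySem.Set.nodup_ofList (pvEdges nodes adj)
  have hkA : ((pvEdges nodes adj).foldl (fun sc k => sc.insert k (pvVal adj k))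
      (PySem.Dict.mk ([] : List ((Int × Int) × Int)))).keys
      = PySem.Set.ofList (pvEdges nodes adj) :=
    pv_keys_insert_fold (pvVal adj) (pvEdges nodes adj)
  have hk0 : ((pvEdges nodes adj).foldl (fun sc k => sc.insert k (0 : Int))
      (PySem.Dict.mk ([] : List ((Int × Int) × Int)))).keys
      = PySem.Set.ofList (pvEdges nodes adj) :=
    pv_keys_insert_fold (fun _ => (0 : Int)) (pvEdges nodes adj)
  have hkF : ((pvRev adj).items.foldl (fun sc q =>
      q.2.foldl (fun sc a' => q.2.foldl (fun sc b' =>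
        if a' < b' ∧ sc.contains (a', b') = true then
          sc.insert (a', b') (sc.getD (a', b') 0 + 1) else sc) sc) sc)
      ((pvEdges nodes adj).foldl (fun sc k => sc.insert k (0 : Int))
        (PySem.Dict.mk ([] : List ((Int × Int) × Int))))).keys
      = PySem.Set.ofList (pvEdges nodes adj) :=
    (pv_keys1 (pvRev adj).items _).trans hk0
  rw [PySem.Dict.items_eq_map_keys _ (by rw [hkA]; exact hndK) 0,
    PySem.Dict.items_eq_map_keys _ (by rw [hkF]; exact hndK) 0, hkA, hkF]
  apply List.map_congr_left
  intro k hkK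
  have hkE : k ∈ pvEdges nodes adj := (PySem.Set.mem_ofList (pvEdges nodes adj) k).1 hkK
  obtain ⟨a, b⟩ := k
  have hab : a < b := pv_edges_lt nodes adj (a, b) hkE
  have h1 : ((pvEdges nodes adj).foldl (fun sc k => sc.insert k (pvVal adj k))
      (PySem.Dict.mk ([] : List ((Int × Int) × Int)))).getD (a, b) 0
      = pvVal adj (a, b) := by
    rw [pv_foldl_insert_getD]
    simp [hkE]
  have h0 : ((pvEdges nodes adj).foldl (fun sc k => sc.insert k (0 : Int))
      (PySem.Dict.mk ([] : List ((Int × Int) × Int)))).getD (a, b) 0 = 0 := by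
    rw [pv_foldl_insert_getD (fun _ => (0 : Int))]
    split_ifs <;> rfl
  have h2 : ((pvRev adj).items.foldl (fun sc q =>
      q.2.foldl (fun sc a' => q.2.foldl (fun sc b' =>
        if a' < b' ∧ sc.contains (a', b') = true then
          sc.insert (a', b') (sc.getD (a', b') 0 + 1) else sc) sc) sc)
      ((pvEdges nodes adj).foldl (fun sc k => sc.insert k (0 : Int))
        (PySem.Dict.mk ([] : List ((Int × Int) × Int))))).getD (a, b) 0
      = ((pvRev adj).items.map
          (fun q => ((q.2.count a : Int)) * ((q.2.count b : Int)))).sum := by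
    rw [pv_getD1 a b hab (PySem.Set.ofList (pvEdges nodes adj)) hkK _ _ hk0, h0, zero_add]
  rw [h1, h2]
  have hndRK : (pvRev adj).keys.Nodup := by
    rw [pv_rev_keys]; exact PySem.Set.nodup_ofList _
  rw [PySem.Dict.items_eq_map_keys (pvRev adj) hndRK [], List.map_map]
  have hcongr : ∀ w ∈ (pvRev adj).keys,
      ((fun q : Int × List Int => ((q.2.count a : Int)) * ((q.2.count b : Int)))
        ∘ (fun w => (w, (pvRev adj).getD w []))) w
        = if (decide (w ∈ pvAG adj a) && decide (w ∈ pvAG adj b)) = true then 1 else 0 := by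
    intro w _
    simp only [Function.comp]
    have hnd := pv_rev_getD_nodup adj hA hv w
    by_cases haw : w ∈ pvAG adj a
    · rw [List.count_eq_one_of_mem hnd ((pv_mem_rev_getD adj hA hv w a).2 haw)]
      by_cases hbw : w ∈ pvAG adj b
      · rw [List.count_eq_one_of_mem hnd ((pv_mem_rev_getD adj hA hv w b).2 hbw)]
        simp [haw, hbw]
      · rw [List.count_eq_zero.2 (fun hc => hbw ((pv_mem_rev_getD adj hA hv w b).1 hc))]
        simp [hbw]
    · rw [List.count_eq_zero.2 (fun hc => haw ((pv_mem_rev_getD adj hA hv w a).1 hc))]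
      simp [haw]
  rw [List.map_congr_left hcongr, PySem.List.sum_map_ite_one_zero,
    List.countP_eq_length_filter]
  have hperm : ((pvRev adj).keys.filter
      (fun w => decide (w ∈ pvAG adj a) && decide (w ∈ pvAG adj b))).Perm
      (PySem.Set.inter (pvAG adj a) (pvAG adj b)) := by
    refine (List.perm_ext_iff_of_nodup (hndRK.filter _)
      (PySem.Set.nodup_inter _ _ (pv_AG_nodup adj hv a))).2 ?_
    intro w
    simp only [List.mem_filter, PySem.Set.mem_inter, Bool.and_eq_true, decide_eq_true_eq]
    constructor
    · rintro ⟨_, hwa, hwb⟩; exact ⟨hwa, hwb⟩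
    · rintro ⟨hwa, hwb⟩; exact ⟨pv_mem_rev_keys adj a w hwa, hwa, hwb⟩
  rw [pvVal, hperm.length_eq]
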